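-- pv_equiv track=rewrite | github.com/stalkerept/the_dumbest_will_survive | Физика (сессия 2025-2026)/Билеты/kod.py | remove_first_h1
-- ===== SOURCE A (Python) =====
-- def remove_first_h1(lines):
--     """Удаляет первую строку, начинающуюся с '# ' (с учётом возможных ведущих пробелов)."""
--     result = []
--     removed = False
--     for line in lines:
--         stripped = line.lstrip()
--         if not removed and stripped.startswith('# '):
--             removed = True
--             continue
--         result.append(line)
--     # Убираем пустые строки в самом начале результата (опционально)
--     while result and result[0].strip() == '':
--         result.pop(0)
--     return result
-- ===== SOURCE B (Python) =====
-- def remove_first_h1(lines):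
--     """Удаляет первую строку, начинающуюся с '# ' (с учётом возможных ведущих пробелов)."""
--     idx = next((i for i, line in enumerate(lines) if line.lstrip().startswith('# ')), None)
--     result = list(lines) if idx is None else list(lines[:idx]) + list(lines[idx + 1:])
--     start = 0
--     while start < len(result) and result[start].strip() == '':
--         start += 1
--     return result[start:]
-- ===== Notes on version B (the rewrite author's own statement) =====
-- stated objective: alternative
-- what changed: Replaces A's flag-driven filter loop plus destructive pop(0) trimming with a find-index-then-slice construction (lines[:idx]+lines[idx+1:]) followed by an integer scan and a single final slice.
import Mathlib
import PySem

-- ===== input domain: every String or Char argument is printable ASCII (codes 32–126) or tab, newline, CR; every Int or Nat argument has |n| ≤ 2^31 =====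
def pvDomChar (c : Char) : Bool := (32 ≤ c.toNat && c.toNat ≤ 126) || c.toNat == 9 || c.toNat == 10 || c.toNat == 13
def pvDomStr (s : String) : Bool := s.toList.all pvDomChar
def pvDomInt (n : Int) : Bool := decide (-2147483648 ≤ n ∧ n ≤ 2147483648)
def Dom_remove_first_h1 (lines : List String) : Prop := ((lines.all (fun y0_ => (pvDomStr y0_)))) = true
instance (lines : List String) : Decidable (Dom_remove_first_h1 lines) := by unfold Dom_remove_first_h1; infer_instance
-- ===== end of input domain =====

-- B rebuilds the result by locating the heading's index and slicing around it, then trims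
-- leading blanks with an index scan and one final slice (alternative decomposition; A's loop
-- with a 'removed' flag and pop(0) trimming disappears). Return value only; no mutation issues.

-- ===== PORT A =====
-- the for-loop over lines with accumulator (result, removed)
def remove_first_h1_loop : List String → List String × Bool → List String × Bool
  | [], st => st
  | line :: rest, st =>
      let stripped := PySem.Str.lstrip line
      if !st.2 && PySem.Str.startswith stripped "# " then
        remove_first_h1_loop rest (st.1, true)
      else
        remove_first_h1_loop rest (st.1 ++ [line], st.2)

-- the while-loop popping blank lines from the front
def remove_first_h1_popBlanks : List String → List String
  | [] => []
  | x :: xs => if PySem.Str.strip x == "" then remove_first_h1_popBlanks xs else x :: xs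

def remove_first_h1 (lines : List String) : List String :=
  remove_first_h1_popBlanks (remove_first_h1_loop lines ([], false)).1

-- ===== PORT B =====
-- idx = next((i for i, line in enumerate(lines) if line.lstrip().startswith('# ')), None)
-- while start < len(result) and result[start].strip() == '': start += 1
def remove_first_h1_countBlanks : List String → Nat
  | [] => 0
  | x :: xs => if PySem.Str.strip x == "" then remove_first_h1_countBlanks xs + 1 else 0

def remove_first_h1_alt (lines : List String) : List String :=
  let idx? := lines.findIdx? (fun line => PySem.Str.startswith (PySem.Str.lstrip line) "# ")
  let result := match idx? with
    | none => lines
    | some i => lines.take i ++ lines.drop (i + 1)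
  result.drop (remove_first_h1_countBlanks result)

-- ===== PRECONDITION & SPEC =====
def Spec_remove_first_h1 (lines : List String) (out : List String) : Prop := out = remove_first_h1_alt lines
instance (lines : List String) (out : List String) : Decidable (Spec_remove_first_h1 lines out) := by unfold Spec_remove_first_h1; infer_instance

-- ===== CLAIM (what is proved, stated in full; the proofs are below) =====
def Claim_equal_remove_first_h1 : Prop := ∀ (lines : List String), Dom_remove_first_h1 lines → Spec_remove_first_h1 lines (remove_first_h1 lines)

-- ===== LEMMAS AND PROOFS =====

-- once removed = true, the loop just appends the rest
theorem loop_true (xs : List String) (acc : List String) :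
    remove_first_h1_loop xs (acc, true) = (acc ++ xs, true) := by
  induction xs generalizing acc with
  | nil => simp [remove_first_h1_loop]
  | cons x rest ih => simp [remove_first_h1_loop, ih]

-- the loop's result equals B's slice construction, generalized over the accumulator
theorem loop_eq_slice (xs : List String) (acc : List String) :
    (remove_first_h1_loop xs (acc, false)).1 =
      acc ++ (match xs.findIdx? (fun line => PySem.Str.startswith (PySem.Str.lstrip line) "# ") with
        | none => xs
        | some i => xs.take i ++ xs.drop (i + 1)) := by
  induction xs generalizing acc with
  | nil => simp [remove_first_h1_loop]
  | cons x rest ih =>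
    rw [List.findIdx?_cons]
    simp only [remove_first_h1_loop, Bool.not_false, Bool.true_and]
    split_ifs with h
    · rw [loop_true]; simp
    · rw [ih]
      cases hf : rest.findIdx? (fun line => PySem.Str.startswith (PySem.Str.lstrip line) "# ") <;>
        simp

-- popping blanks = dropping the counted prefix
theorem popBlanks_eq_drop (xs : List String) :
    remove_first_h1_popBlanks xs = xs.drop (remove_first_h1_countBlanks xs) := by
  induction xs with
  | nil => rfl
  | cons x rest ih =>
    by_cases h : PySem.Str.strip x == ""
    · simp [remove_first_h1_popBlanks, remove_first_h1_countBlanks, h, ih]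
    · simp [remove_first_h1_popBlanks, remove_first_h1_countBlanks, h]

-- ===== VERDICT (by name: the statement is the Claim_ definition above) =====
theorem remove_first_h1_spec : Claim_equal_remove_first_h1 := by
  intro lines _
  unfold Spec_remove_first_h1 remove_first_h1 remove_first_h1_alt
  rw [loop_eq_slice, popBlanks_eq_drop]
  simp
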